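-- pv_equiv track=rewrite | github.com/Srash23/Genomic-Data-Analysis- | protein.py | makeAminoAcidLabels
-- ===== SOURCE A (Python) =====
-- def makeAminoAcidLabels(proteinList1, proteinList2):
--
--     Unique_aa = []
--
--     for p in proteinList1:
--
--         for aa in p:
--
--             if aa not in Unique_aa:
--
--                 Unique_aa.append(aa)
--
--     for p in proteinList2:
--
--         for aa in p:
--
--             if aa not in Unique_aa:
--
--                 Unique_aa.append(aa)
--
--     Unique_aa.sort()
--
--     return Unique_aa
-- ===== SOURCE B (Python) =====
-- def makeAminoAcidLabels(proteinList1, proteinList2):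
--     combined = []
--     for p in proteinList1:
--         combined.extend(p)
--     for p in proteinList2:
--         combined.extend(p)
--     combined.sort()
--     result = []
--     for c in combined:
--         if not result or result[-1] != c:
--             result.append(c)
--     return result
-- ===== Notes on version B (the rewrite author's own statement) =====
-- stated objective: alternative
-- what changed: Replaces dedup-during-collection (membership test against the growing unique list for every character, then a final sort) with flatten-everything, sort once, and a single linear pass dropping adjacent duplicates.
import Mathlib
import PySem

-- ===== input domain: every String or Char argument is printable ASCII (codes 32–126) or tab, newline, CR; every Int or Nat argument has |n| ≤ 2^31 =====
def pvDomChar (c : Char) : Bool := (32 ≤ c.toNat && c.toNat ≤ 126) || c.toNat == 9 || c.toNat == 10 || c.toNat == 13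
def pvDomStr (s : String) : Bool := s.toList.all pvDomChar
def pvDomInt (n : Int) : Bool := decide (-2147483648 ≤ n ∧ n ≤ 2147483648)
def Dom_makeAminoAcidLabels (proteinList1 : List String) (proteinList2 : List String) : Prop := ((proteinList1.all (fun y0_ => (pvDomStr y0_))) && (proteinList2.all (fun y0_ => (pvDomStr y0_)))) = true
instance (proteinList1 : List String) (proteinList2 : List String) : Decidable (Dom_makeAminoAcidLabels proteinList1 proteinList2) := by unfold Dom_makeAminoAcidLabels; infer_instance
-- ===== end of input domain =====

-- B sorts the flattened characters once and removes adjacent duplicates in one pass,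
-- instead of A's membership scan of the growing unique list for every character.

-- ===== PORT A =====
-- 'for aa in p: if aa not in Unique_aa: Unique_aa.append(aa)' over one protein string
def pvAaddProtein (acc : List String) (p : String) : List String :=
  p.toList.foldl
    (fun acc aa => if String.singleton aa ∈ acc then acc else acc ++ [String.singleton aa]) acc

def makeAminoAcidLabels (proteinList1 : List String) (proteinList2 : List String) : List String :=
  let u1 := proteinList1.foldl pvAaddProtein []
  let u2 := proteinList2.foldl pvAaddProtein u1
  PySem.List.sorted u2 (fun x => x) false

-- ===== PORT B =====
-- 'combined.extend(p)' over one protein string (characters as 1-char strings)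
def pvBextend (acc : List String) (p : String) : List String :=
  acc ++ p.toList.map String.singleton

-- 'if not result or result[-1] != c: result.append(c)'
def pvBstep (res : List String) (c : String) : List String :=
  if res.getLast? = some c then res else res ++ [c]

def makeAminoAcidLabels_alt (proteinList1 : List String) (proteinList2 : List String) : List String :=
  let c1 := proteinList1.foldl pvBextend []
  let c2 := proteinList2.foldl pvBextend c1
  let s := PySem.List.sorted c2 (fun x => x) false
  s.foldl pvBstep []

-- ===== PRECONDITION & SPEC =====
def Spec_makeAminoAcidLabels (proteinList1 : List String) (proteinList2 : List String) (out : List String) : Prop := out = makeAminoAcidLabels_alt proteinList1 proteinList2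
instance (proteinList1 : List String) (proteinList2 : List String) (out : List String) : Decidable (Spec_makeAminoAcidLabels proteinList1 proteinList2 out) := by unfold Spec_makeAminoAcidLabels; infer_instance

-- ===== CLAIM (what is proved, stated in full; the proofs are below) =====
def Claim_equal_makeAminoAcidLabels : Prop := ∀ (proteinList1 : List String) (proteinList2 : List String), Dom_makeAminoAcidLabels proteinList1 proteinList2 → Spec_makeAminoAcidLabels proteinList1 proteinList2 (makeAminoAcidLabels proteinList1 proteinList2)

-- ===== LEMMAS AND PROOFS =====

def pvChars (l : List String) : List String :=
  l.flatMap (fun p => p.toList.map String.singleton)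

-- A's dedup loop over one protein is a Python-set update with its characters
theorem pvAaddProtein_eq_update (acc : List String) (p : String) :
    pvAaddProtein acc p = PySem.Set.update acc (p.toList.map String.singleton) := by
  rw [pvAaddProtein, PySem.Set.update, List.foldl_map]
  apply PySem.List.foldl_congr_mem
  intro a x _
  by_cases h : String.singleton x ∈ a <;> simp [PySem.Set.add, h]

-- … and over a protein list, an update with all their characters
theorem pvA_fold_eq_update (l : List String) (acc : List String) :
    l.foldl pvAaddProtein acc = PySem.Set.update acc (pvChars l) := by
  induction l generalizing acc with
  | nil => simp [PySem.Set.update, pvChars]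
  | cons p t ih =>
    simp only [pvChars, List.flatMap_cons]
    rw [List.foldl_cons, ih, pvAaddProtein_eq_update]
    simp only [pvChars]
    rw [PySem.Set.update, PySem.Set.update, PySem.Set.update, List.foldl_append]

-- B's extend loop flattens the characters
theorem pvB_fold_eq_flatMap (l : List String) (acc : List String) :
    l.foldl pvBextend acc = acc ++ pvChars l := by
  exact PySem.List.foldl_append_eq_flatMap (fun p => p.toList.map String.singleton) l acc

-- every element within a strictly increasing list is at most its last element
theorem le_getLast_of_pairwise (res : List String) (h : res.Pairwise (· ≤ ·)) (m : String)
    (hm : res.getLast? = some m) : ∀ r ∈ res, r ≤ m := by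
  induction res with
  | nil => simp at hm
  | cons a t ih =>
    obtain ⟨h1, h2⟩ := List.pairwise_cons.mp h
    cases t with
    | nil => simp_all
    | cons b u =>
      simp only [List.getLast?_cons_cons] at hm
      intro r hr
      rcases List.mem_cons.mp hr with rfl | hr
      · exact h1 m (List.mem_of_getLast? hm)
      · exact ih h2 hm r hr

-- the adjacent-dedup pass keeps exactly the values present
theorem pvBstep_mem (s : List String) (res : List String) (x : String) :
    x ∈ s.foldl pvBstep res ↔ x ∈ res ∨ x ∈ s := by
  induction s generalizing res with
  | nil => simp
  | cons c t ih =>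
    simp only [List.foldl_cons, List.mem_cons]
    by_cases h : res.getLast? = some c
    · have hc : c ∈ res := List.mem_of_getLast? h
      rw [pvBstep, if_pos h, ih]
      constructor
      · rintro (h1 | h2); exacts [Or.inl h1, Or.inr (Or.inr h2)]
      · rintro (h1 | rfl | h2); exacts [Or.inl h1, Or.inl hc, Or.inr h2]
    · rw [pvBstep, if_neg h, ih]
      simp only [List.mem_append, List.mem_singleton]
      tauto

-- on a sorted input the adjacent-dedup pass yields a strictly increasing list
theorem pvBstep_pairwise (s : List String) (res : List String)
    (hs : s.Pairwise (· ≤ ·)) (hres : res.Pairwise (· < ·))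
    (hle : ∀ r ∈ res, ∀ c ∈ s, r ≤ c) :
    (s.foldl pvBstep res).Pairwise (· < ·) := by
  induction s generalizing res with
  | nil => simpa using hres
  | cons c t ih =>
    obtain ⟨hs1, hs2⟩ := List.pairwise_cons.mp hs
    simp only [List.foldl_cons]
    by_cases h : res.getLast? = some c
    · rw [pvBstep, if_pos h]
      exact ih res hs2 hres (fun r hr c' hc' => hle r hr c' (List.mem_cons_of_mem _ hc'))
    · rw [pvBstep, if_neg h]
      apply ih _ hs2
      · rw [List.pairwise_append]
        refine ⟨hres, by simp, ?_⟩
        intro r hr c' hc'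
        simp only [List.mem_singleton] at hc'; subst hc'
        obtain ⟨m, hm⟩ : ∃ m, res.getLast? = some m := by
          cases hres' : res.getLast? with
          | none => rw [List.getLast?_eq_none_iff] at hres'; subst hres'; simp at hr
          | some m => exact ⟨m, rfl⟩
        have hrm : r ≤ m := le_getLast_of_pairwise res (hres.imp le_of_lt) m hm r hr
        have hmc : m ≤ c' := hle m (List.mem_of_getLast? hm) c' (List.mem_cons_self ..)
        have hmne : m ≠ c' := by intro hh; apply h; rw [hm, hh]
        exact lt_of_le_of_lt hrm (lt_of_le_of_ne hmc hmne)
      · intro r hr c' hc'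
        rcases List.mem_append.mp hr with hr | hr
        · exact hle r hr c' (List.mem_cons_of_mem _ hc')
        · simp only [List.mem_singleton] at hr; subst hr; exact hs1 c' hc'

-- ===== VERDICT (by name: the statement is the Claim_ definition above) =====
theorem makeAminoAcidLabels_spec : Claim_equal_makeAminoAcidLabels := by
  intro l1 l2 _
  unfold Spec_makeAminoAcidLabels makeAminoAcidLabels makeAminoAcidLabels_alt
  show PySem.List.sorted (l2.foldl pvAaddProtein (l1.foldl pvAaddProtein [])) (fun x => x) false =
    (PySem.List.sorted (l2.foldl pvBextend (l1.foldl pvBextend [])) (fun x => x) false).foldl pvBstep []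
  have hA : l2.foldl pvAaddProtein (l1.foldl pvAaddProtein []) =
      PySem.Set.ofList (pvChars l1 ++ pvChars l2) := by
    rw [pvA_fold_eq_update, pvA_fold_eq_update, PySem.Set.ofList_eq_foldl,
      List.foldl_append]
    rfl
  have hB : l2.foldl pvBextend (l1.foldl pvBextend []) = pvChars l1 ++ pvChars l2 := by
    rw [pvB_fold_eq_flatMap, pvB_fold_eq_flatMap, List.nil_append]
  rw [hA, hB]
  set F := pvChars l1 ++ pvChars l2 with hF
  set r := (PySem.List.sorted F (fun x => x) false).foldl pvBstep [] with hr
  have hpair : r.Pairwise (· < ·) := by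
    apply pvBstep_pairwise _ _ ?_ (by simp) (by simp)
    exact PySem.List.sorted_pairwise (xs := F) (key := fun x => x)
  have hperm : r.Perm (PySem.Set.ofList F) := by
    apply (List.perm_ext_iff_of_nodup (hpair.imp ne_of_lt) (PySem.Set.nodup_ofList F)).mpr
    intro x
    rw [hr, pvBstep_mem, PySem.List.mem_sorted, PySem.Set.mem_ofList F x]
    simp
  exact PySem.List.sorted_eq_of_perm_of_pairwise_lt _ r (fun x => x) hperm hpair
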